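-- pv_equiv track=rewrite | github.com/edt-yxz-zzd/python3_src | seed/math/factor_pint_as_pefect_power_.py | _prepare4is_kth_power_
-- ===== SOURCE A (Python) =====
-- def _prepare4is_kth_power_(max_k, max_n, /):
--     _k2kpows = [None, None]
--     for k in range(2, 1+max_k):
--         s = set()
--         for i in range(2, 1+max_n):
--             n = i**k #kpow
--             if n > max_n:break
--             s.add(n)
--         _k2kpows.append(s)
--     return _k2kpows
-- ===== SOURCE B (Python) =====
-- def _iroot(n, k):
--     # largest r >= 1 with r**k <= n; requires n >= 1
--     lo, hi = 1, n
--     while lo < hi: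
--         mid = (lo + hi + 1) // 2
--         if mid ** k <= n:
--             lo = mid
--         else:
--             hi = mid - 1
--     return lo
--
--
-- def _prepare4is_kth_power_(max_k, max_n, /):
--     out = [None, None]
--     # 2**k <= max_n iff k < kmax, so no power of any base fits once k >= kmax
--     kmax = max_n.bit_length() if max_n > 0 else 0
--     for k in range(2, 1 + max_k):
--         r = _iroot(max_n, k) if k < kmax else 1
--         out.append({i ** k for i in range(2, r + 1)})
--     return out
-- ===== Notes on version B (the rewrite author's own statement) =====
-- stated objective: faster
-- what changed: Instead of A's inner scan over bases (which computes 2**k for every exponent k even when no power fits), B precomputes the threshold kmax = max_n.bit_length() once and, for each k below it, finds the integer k-th root of max_n by binary search and builds the set of powers directly from range(2, root+1); for k >= kmax the slot is known empty in O(1).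
import Mathlib
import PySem

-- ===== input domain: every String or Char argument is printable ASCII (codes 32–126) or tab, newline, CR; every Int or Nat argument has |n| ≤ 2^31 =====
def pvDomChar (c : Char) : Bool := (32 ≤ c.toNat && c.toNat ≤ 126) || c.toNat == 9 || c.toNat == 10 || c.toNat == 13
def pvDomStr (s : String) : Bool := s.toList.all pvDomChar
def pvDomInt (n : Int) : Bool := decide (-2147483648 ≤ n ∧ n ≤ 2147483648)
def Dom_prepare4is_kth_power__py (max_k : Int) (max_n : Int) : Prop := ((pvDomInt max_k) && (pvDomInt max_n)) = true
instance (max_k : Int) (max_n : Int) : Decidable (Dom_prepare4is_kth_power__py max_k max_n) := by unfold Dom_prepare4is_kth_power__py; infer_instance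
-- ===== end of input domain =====

-- B replaces A's per-exponent scan over bases (which evaluates 2**k for every k) by a
-- bit_length threshold plus a binary search for the integer k-th root, building each set
-- of powers directly; measurably faster on large max_k, same exact output (proved below).

-- ===== PORT A =====
-- A's inner 'for i in range(2, 1+max_n): n = i**k; if n > max_n: break; s.add(n)'
-- (k comes from range(2, 1+max_k), so k ≥ 2 and 'i**k' is 'i ^ k.toNat' exactly)
def pvALoop (k max_n : Int) (s : PySem.Set Int) : List Int → PySem.Set Int
  | [] => s
  | i :: rest =>
    let n := i ^ k.toNat
    if n > max_n then s else pvALoop k max_n (PySem.Set.add s n) rest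

def prepare4is_kth_power__py (max_k : Int) (max_n : Int) : List (Option (List Int)) :=
  (PySem.List.pyRange 2 (1 + max_k) 1).foldl
    (fun acc k =>
      acc ++ [some (pvALoop k max_n PySem.Set.empty (PySem.List.pyRange 2 (1 + max_n) 1))])
    [none, none]

-- ===== PORT B =====
-- Source B's '_iroot': binary search 'lo, hi = 1, max(1, n); while lo < hi: …'
def pvIrootGo (n k lo hi : Int) : Int :=
  if _h : lo < hi then
    let mid := PySem.Int.floordiv (lo + hi + 1) 2
    if mid ^ k.toNat ≤ n then pvIrootGo n k mid hi
    else pvIrootGo n k lo (mid - 1)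
  else lo
termination_by (hi - lo).toNat
decreasing_by
  · have hd := PySem.Int.floordiv_eq_ediv_of_pos (a := lo + hi + 1) (b := 2) (by norm_num)
    simp only [hd]; omega
  · have hd := PySem.Int.floordiv_eq_ediv_of_pos (a := lo + hi + 1) (b := 2) (by norm_num)
    simp only [hd]; omega

def pvIroot (n k : Int) : Int := pvIrootGo n k 1 n

def prepare4is_kth_power__py_alt (max_k : Int) (max_n : Int) : List (Option (List Int)) :=
  -- Source B: kmax = max_n.bit_length() if max_n > 0 else 0
  let kmax : Int := if max_n > 0 then (PySem.Int.bitLength max_n : Int) else 0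
  (PySem.List.pyRange 2 (1 + max_k) 1).foldl
    (fun acc k =>
      let r := if k < kmax then pvIroot max_n k else 1
      acc ++ [some (PySem.Set.ofList
        ((PySem.List.pyRange 2 (r + 1) 1).map (fun i => i ^ k.toNat)))])
    [none, none]

-- ===== PRECONDITION & SPEC =====
def Spec_prepare4is_kth_power__py (max_k : Int) (max_n : Int) (out : List (Option (List Int))) : Prop := out = prepare4is_kth_power__py_alt max_k max_n
instance (max_k : Int) (max_n : Int) (out : List (Option (List Int))) : Decidable (Spec_prepare4is_kth_power__py max_k max_n out) := by unfold Spec_prepare4is_kth_power__py; infer_instance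

-- ===== CLAIM (what is proved, stated in full; the proofs are below) =====
def Claim_equal_prepare4is_kth_power__py : Prop := ∀ (max_k : Int) (max_n : Int), Dom_prepare4is_kth_power__py max_k max_n → Spec_prepare4is_kth_power__py max_k max_n (prepare4is_kth_power__py max_k max_n)

-- ===== LEMMAS AND PROOFS =====

-- proof-side bridge: the exponent threshold test of B, written as a power comparison
def pvRoot (n k : Int) : Int := if 2 ^ k.toNat > n then 1 else pvIroot n k

-- binary-search invariant: if lo^K ≤ n < (hi+1)^K with 1 ≤ lo ≤ hi, the result r
-- satisfies 1 ≤ r, r^K ≤ n and n < (r+1)^K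
theorem pvIrootGo_spec (n k : Int) :
    ∀ (fuel : Nat) (lo hi : Int), (hi - lo).toNat ≤ fuel → 1 ≤ lo → lo ≤ hi →
      lo ^ k.toNat ≤ n → n < (hi + 1) ^ k.toNat →
      1 ≤ pvIrootGo n k lo hi ∧ (pvIrootGo n k lo hi) ^ k.toNat ≤ n ∧
        n < (pvIrootGo n k lo hi + 1) ^ k.toNat := by
  intro fuel
  induction fuel with
  | zero =>
    intro lo hi hf h1 hlh hL hH
    have heq : lo = hi := by omega
    rw [pvIrootGo, dif_neg (by omega)]
    exact ⟨h1, hL, by rw [heq]; exact hH⟩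
  | succ m ih =>
    intro lo hi hf h1 hlh hL hH
    by_cases hlt : lo < hi
    · rw [pvIrootGo, dif_pos hlt]
      have hd := PySem.Int.floordiv_eq_ediv_of_pos (a := lo + hi + 1) (b := 2) (by norm_num)
      have hmid : lo < PySem.Int.floordiv (lo + hi + 1) 2 ∧
          PySem.Int.floordiv (lo + hi + 1) 2 ≤ hi := by rw [hd]; omega
      by_cases hp : PySem.Int.floordiv (lo + hi + 1) 2 ^ k.toNat ≤ n
      · rw [if_pos hp]
        exact ih _ hi (by omega) (by omega) hmid.2 hp hH
      · rw [if_neg hp]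
        refine ih lo _ (by omega) h1 (by omega) hL ?_
        have : PySem.Int.floordiv (lo + hi + 1) 2 - 1 + 1 =
            PySem.Int.floordiv (lo + hi + 1) 2 := by ring
        rw [this]; omega
    · have heq : lo = hi := by omega
      rw [pvIrootGo, dif_neg hlt]
      exact ⟨h1, hL, by rw [heq]; exact hH⟩

-- for n ≥ 1 the binary search returns the exact integer k-th root bracket
theorem pvIroot_spec (n k : Int) (hk : 2 ≤ k) (hn : 1 ≤ n) :
    1 ≤ pvIroot n k ∧ (pvIroot n k) ^ k.toNat ≤ n ∧ n < (pvIroot n k + 1) ^ k.toNat := by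
  unfold pvIroot
  refine pvIrootGo_spec n k (n - 1).toNat 1 n (by omega) le_rfl hn (by simpa using hn) ?_
  calc n < n + 1 := by omega
    _ ≤ (n + 1) ^ k.toNat := le_self_pow₀ (by omega) (by omega)

-- the root never exceeds n once n ≥ 1
theorem pvIroot_le (n k : Int) (hk : 2 ≤ k) (hn : 1 ≤ n) : pvIroot n k ≤ n := by
  obtain ⟨hr, h, -⟩ := pvIroot_spec n k hk hn
  rcases lt_or_ge (pvIroot n k) 2 with h2 | h2
  · omega
  · calc pvIroot n k ≤ (pvIroot n k) ^ k.toNat :=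
        le_self_pow₀ (by omega) (by omega)
      _ ≤ n := h

theorem two_pow_pos (k : Int) : (0 : Int) < 2 ^ k.toNat := pow_pos (by norm_num) _

-- below the root every base's power fits
theorem pow_le_of_le_root (n k i : Int) (hk : 2 ≤ k) (hi : 2 ≤ i)
    (hle : i ≤ pvRoot n k) : i ^ k.toNat ≤ n := by
  unfold pvRoot at hle
  split at hle
  · omega
  · have h2 : 2 ^ k.toNat ≤ n := by omega
    have hn : 1 ≤ n := by have := two_pow_pos k; omega
    obtain ⟨hr, h, -⟩ := pvIroot_spec n k hk hn
    calc i ^ k.toNat ≤ (pvIroot n k) ^ k.toNat := pow_le_pow_left₀ (by omega) hle _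
      _ ≤ n := h

-- above the root every base's power overflows
theorem lt_pow_of_root_lt (n k i : Int) (hk : 2 ≤ k) (hi : 2 ≤ i)
    (hlt : pvRoot n k < i) : n < i ^ k.toNat := by
  unfold pvRoot at hlt
  by_cases h2 : 2 ^ k.toNat > n
  · rw [if_pos h2] at hlt
    calc n < 2 ^ k.toNat := h2
      _ ≤ i ^ k.toNat := pow_le_pow_left₀ (by norm_num) hi _
  · rw [if_neg h2] at hlt
    have hn : 1 ≤ n := by have := two_pow_pos k; omega
    obtain ⟨hr, -, h⟩ := pvIroot_spec n k hk hn
    calc n < (pvIroot n k + 1) ^ k.toNat := h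
      _ ≤ i ^ k.toNat := pow_le_pow_left₀ (by omega) (by omega) _

-- the root is below any base exceeding n
theorem root_lt (n k i : Int) (hk : 2 ≤ k) (hi : 2 ≤ i) (h : n < i) : pvRoot n k < i := by
  unfold pvRoot
  by_cases h2 : 2 ^ k.toNat > n
  · rw [if_pos h2]; omega
  · rw [if_neg h2]
    have hn : 1 ≤ n := by have := two_pow_pos k; omega
    have := pvIroot_le n k hk hn
    omega

-- B's bit_length threshold agrees with the power comparison
theorem root_eq_pvRoot (n k : Int) (hk : 2 ≤ k) :
    (if k < (if n > 0 then (PySem.Int.bitLength n : Int) else 0) then pvIroot n k else 1) =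
      pvRoot n k := by
  unfold pvRoot
  by_cases hn : n > 0
  · rw [if_pos hn]
    by_cases hkb : k < (PySem.Int.bitLength n : Int)
    · rw [if_pos hkb]
      have hfit : 2 ^ k.toNat ≤ n := by
        have h := PySem.Int.two_pow_bitLength_le n (by omega)
        have h' : ((2 ^ (PySem.Int.bitLength n - 1) : Nat) : Int) ≤ (n.natAbs : Int) := by
          exact_mod_cast h
        calc (2 : Int) ^ k.toNat ≤ 2 ^ (PySem.Int.bitLength n - 1) :=
              pow_le_pow_right₀ (by norm_num) (by omega)
          _ = ((2 ^ (PySem.Int.bitLength n - 1) : Nat) : Int) := by push_cast; ring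
          _ ≤ (n.natAbs : Int) := h'
          _ = n := Int.natAbs_of_nonneg (by omega)
      rw [if_neg (by omega)]
    · rw [if_neg hkb]
      have hbig : n < 2 ^ k.toNat := by
        have h := PySem.Int.lt_two_pow_bitLength n
        calc n = (n.natAbs : Int) := (Int.natAbs_of_nonneg (by omega)).symm
          _ < ((2 ^ PySem.Int.bitLength n : Nat) : Int) := by exact_mod_cast h
          _ = (2 : Int) ^ PySem.Int.bitLength n := by push_cast; ring
          _ ≤ 2 ^ k.toNat := pow_le_pow_right₀ (by norm_num) (by omega)
      rw [if_pos (by omega)]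
  · rw [if_neg hn, if_neg (by omega)]
    have hbig : n < 2 ^ k.toNat := by
      calc n < 4 := by omega
        _ = (2 : Int) ^ 2 := by norm_num
        _ ≤ 2 ^ k.toNat := pow_le_pow_right₀ (by norm_num) (by omega)
    rw [if_pos (by omega)]

-- A's break-loop from base i equals the map over bases up to the root
theorem pvALoop_eq (k max_n : Int) (hk : 2 ≤ k) :
    ∀ (fuel : Nat) (i : Int) (s : PySem.Set Int), fuel = (1 + max_n - i).toNat → 2 ≤ i →
      pvALoop k max_n s (PySem.List.pyRange i (1 + max_n) 1) =
        ((PySem.List.pyRange i (pvRoot max_n k + 1) 1).map (fun j => j ^ k.toNat)).foldl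
          PySem.Set.add s := by
  intro fuel
  induction fuel with
  | zero =>
    intro i s hf hi
    have hnil : (1 : Int) + max_n ≤ i := by omega
    rw [PySem.List.pyRange_one_eq_nil hnil]
    have hrn : pvRoot max_n k + 1 ≤ i := by
      have := root_lt max_n k i hk hi (by omega); omega
    rw [PySem.List.pyRange_one_eq_nil hrn]
    simp [pvALoop]
  | succ m ih =>
    intro i s hf hi
    by_cases hlt : i < 1 + max_n
    · rw [PySem.List.pyRange_one_cons hlt]
      simp only [pvALoop]
      by_cases hbig : i ^ k.toNat > max_n
      · rw [if_pos hbig]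
        have hri : pvRoot max_n k < i := by
          by_contra hle
          exact absurd (pow_le_of_le_root max_n k i hk hi (by omega)) (by omega)
        rw [PySem.List.pyRange_one_eq_nil (by omega)]
        simp
      · rw [if_neg hbig]
        have hir : i ≤ pvRoot max_n k := by
          by_contra hgt
          exact absurd (lt_pow_of_root_lt max_n k i hk hi (by omega)) (by omega)
        rw [PySem.List.pyRange_one_cons (show i < pvRoot max_n k + 1 by omega)]
        simp only [List.map_cons, List.foldl_cons]
        exact ih (i + 1) (PySem.Set.add s (i ^ k.toNat)) (by omega) (by omega)
    · rw [PySem.List.pyRange_one_eq_nil (by omega)]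
      have hrn : pvRoot max_n k + 1 ≤ i := by
        have := root_lt max_n k i hk hi (by omega); omega
      rw [PySem.List.pyRange_one_eq_nil hrn]
      simp [pvALoop]

-- per-exponent slots coincide
theorem slot_eq (k max_n : Int) (hk : 2 ≤ k) :
    pvALoop k max_n PySem.Set.empty (PySem.List.pyRange 2 (1 + max_n) 1) =
      PySem.Set.ofList
        ((PySem.List.pyRange 2 (pvRoot max_n k + 1) 1).map (fun i => i ^ k.toNat)) := by
  rw [pvALoop_eq k max_n hk (1 + max_n - 2).toNat 2 PySem.Set.empty rfl (by omega)]
  rw [PySem.Set.ofList_eq_foldl]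
  rfl

-- ===== VERDICT (by name: the statement is the Claim_ definition above) =====
theorem prepare4is_kth_power__py_spec : Claim_equal_prepare4is_kth_power__py := by
  intro max_k max_n _
  unfold Spec_prepare4is_kth_power__py prepare4is_kth_power__py prepare4is_kth_power__py_alt
  apply PySem.List.foldl_congr_mem
  intro acc k hkmem
  have hk : 2 ≤ k := ((PySem.List.mem_pyRange_one).1 hkmem).1
  simp only [slot_eq k max_n hk, root_eq_pvRoot max_n k hk]
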